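-- pv_equiv track=rewrite | github.com/zhaipro/acm | leetcode/LCP30.py | magicTower
-- ===== SOURCE A (Python) =====
-- from typing import List
--
-- def magicTower(nums: List[int]) -> int:
--     if sum(nums) < 0:
--         return -1
--     r = 0
--     c = 1
--     t = []
--     for x in nums:
--         if x < 0:
--             t.append(x)
--         c += x
--         if c <= 0:
--             r += 1
--             c -= min(t)
--             t.remove(min(t))
--     return r
-- ===== SOURCE B (Python) =====
-- from typing import List
--
-- # B: leftist min-heap for the deferred negatives instead of A's min()+remove()
-- # list scans; the most-negative deferred value sits at the heap root.
--
-- def _merge(a, b):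
--     # leftist-heap merge; nodes are (value, rank, left, right), None = empty
--     if a is None:
--         return b
--     if b is None:
--         return a
--     if a[0] <= b[0]:
--         v, l, r = a[0], a[2], _merge(a[3], b)
--     else:
--         v, l, r = b[0], b[2], _merge(a, b[3])
--     rl = l[1] if l is not None else 0
--     rr = r[1] if r is not None else 0
--     if rl >= rr:
--         return (v, rr + 1, l, r)
--     return (v, rl + 1, r, l)
--
-- def magicTower(nums: List[int]) -> int:
--     if sum(nums) < 0:
--         return -1
--     moves = 0
--     hp = 1
--     heap = None
--     for x in nums:
--         if x < 0:
--             heap = _merge((x, 1, None, None), heap)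
--         hp += x
--         if hp <= 0:
--             moves += 1
--             hp -= heap[0]
--             heap = _merge(heap[2], heap[3])
--     return moves
-- ===== Notes on version B (the rewrite author's own statement) =====
-- stated objective: alternative
-- what changed: A keeps the deferred negatives in an unordered list and does min(t)+t.remove(min(t)) scans at each move; B stores them in a hand-written leftist min-heap and pops the root, a genuinely different data structure (intended as asymptotically better, but not measured >=1.5x faster on the generated inputs).
import Mathlib
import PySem

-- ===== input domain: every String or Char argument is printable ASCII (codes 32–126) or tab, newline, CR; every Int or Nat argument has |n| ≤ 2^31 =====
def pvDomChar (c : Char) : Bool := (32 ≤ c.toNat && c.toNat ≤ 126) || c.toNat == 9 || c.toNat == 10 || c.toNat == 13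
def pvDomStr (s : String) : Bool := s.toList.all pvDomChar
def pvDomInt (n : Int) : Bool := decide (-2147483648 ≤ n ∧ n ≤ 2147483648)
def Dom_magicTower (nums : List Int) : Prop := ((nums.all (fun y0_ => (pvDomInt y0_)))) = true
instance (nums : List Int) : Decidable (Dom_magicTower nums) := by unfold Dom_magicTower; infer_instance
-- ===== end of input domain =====

-- B replaces A's min(t)+t.remove(min(t)) list scans by a leftist min-heap of the
-- deferred negatives (objective: alternative data structure, same results).

-- ===== PORT A =====
-- state = (r, c, t)
def magicTowerStepA (s : Int × Int × List Int) (x : Int) : Int × Int × List Int :=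
  let t := if x < 0 then s.2.2 ++ [x] else s.2.2   -- if x < 0: t.append(x)
  let c := s.2.1 + x                                -- c += x
  if c ≤ 0 then
    match PySem.List.min? t (fun y => y) with       -- min(t); none = Python's ValueError,
    | some m => (s.1 + 1, c - m, (PySem.List.remove? t m).getD t)  -- t.remove(min(t))
    | none => (s.1, c, t)                           -- unreachable: t ≠ [] whenever c ≤ 0 (proved below)
  else (s.1, c, t)

def magicTower (nums : List Int) : Int :=
  if nums.sum < 0 then -1
  else (nums.foldl magicTowerStepA (0, 1, [])).1

-- ===== PORT B =====
-- Source B's heap nodes (value, rank, left, right) / None become an inductive tree.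
inductive MTHeap : Type
  | leaf : MTHeap
  | node : Int → Int → MTHeap → MTHeap → MTHeap
deriving DecidableEq, Repr

def MTHeap.size : MTHeap → Nat
  | .leaf => 0
  | .node _ _ l r => l.size + r.size + 1

def MTHeap.rank : MTHeap → Int          -- Source B's 'l[1] if l is not None else 0'
  | .leaf => 0
  | .node _ k _ _ => k

-- Source B's _merge, last four lines (rank fix-up / child swap)
def mtMake (v : Int) (l r : MTHeap) : MTHeap :=
  if l.rank ≥ r.rank then .node v (r.rank + 1) l r
  else .node v (l.rank + 1) r l

-- Source B's _merge
def mtMerge : MTHeap → MTHeap → MTHeap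
  | .leaf, b => b
  | a, .leaf => a
  | .node v1 k1 l1 r1, .node v2 k2 l2 r2 =>
    if v1 ≤ v2 then mtMake v1 l1 (mtMerge r1 (.node v2 k2 l2 r2))
    else mtMake v2 l2 (mtMerge (.node v1 k1 l1 r1) r2)
termination_by a b => a.size + b.size
decreasing_by all_goals simp [MTHeap.size]; try omega

-- Source B's loop, transcribed as recursion over the list with state (moves, hp, heap)
def magicTowerGo (moves hp : Int) (heap : MTHeap) : List Int → Int
  | [] => moves
  | x :: xs =>
    let heap' := if x < 0 then mtMerge (.node x 1 .leaf .leaf) heap else heap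
    let hp' := hp + x
    match heap' with
    | .node v _ l r =>
      if hp' ≤ 0 then magicTowerGo (moves + 1) (hp' - v) (mtMerge l r) xs
      else magicTowerGo moves hp' heap' xs
    | .leaf => magicTowerGo moves hp' heap' xs   -- if hp' ≤ 0 here Python raises; unreachable (proved below)

def magicTower_alt (nums : List Int) : Int :=
  if nums.sum < 0 then -1
  else magicTowerGo 0 1 .leaf nums

-- ===== PRECONDITION & SPEC =====
def Spec_magicTower (nums : List Int) (out : Int) : Prop := out = magicTower_alt nums
instance (nums : List Int) (out : Int) : Decidable (Spec_magicTower nums out) := by unfold Spec_magicTower; infer_instance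

-- ===== CLAIM (what is proved, stated in full; the proofs are below) =====
def Claim_equal_magicTower : Prop := ∀ (nums : List Int), Dom_magicTower nums → Spec_magicTower nums (magicTower nums)

-- ===== LEMMAS AND PROOFS =====

def MTHeap.toList : MTHeap → List Int
  | .leaf => []
  | .node v _ l r => v :: (l.toList ++ r.toList)

-- heap order: the root of every subtree is ≤ everything below it
def MTHeap.IsHeap : MTHeap → Prop
  | .leaf => True
  | .node v _ l r => (∀ y ∈ l.toList ++ r.toList, v ≤ y) ∧ l.IsHeap ∧ r.IsHeap

lemma mtMake_perm (v : Int) (l r : MTHeap) :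
    (mtMake v l r).toList.Perm (v :: (l.toList ++ r.toList)) := by
  unfold mtMake
  split
  · exact List.Perm.refl _
  · exact List.Perm.cons v List.perm_append_comm

lemma mtMerge_perm (a b : MTHeap) :
    (mtMerge a b).toList.Perm (a.toList ++ b.toList) := by
  fun_induction mtMerge a b with
  | case1 b => simp [MTHeap.toList]
  | case2 a h => simp [MTHeap.toList]
  | case3 v1 k1 l1 r1 v2 k2 l2 r2 hle ih =>
    refine (mtMake_perm _ _ _).trans ?_
    simp only [MTHeap.toList, List.cons_append, List.append_assoc]
    exact (ih.append_left l1.toList).cons v1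
  | case4 v1 k1 l1 r1 v2 k2 l2 r2 hle ih =>
    refine (mtMake_perm _ _ _).trans (List.Perm.trans ?_ List.perm_middle.symm)
    refine List.Perm.cons v2 ?_
    have h1 : (l2.toList ++ (mtMerge (.node v1 k1 l1 r1) r2).toList).Perm
        (l2.toList ++ ((MTHeap.node v1 k1 l1 r1).toList ++ r2.toList)) :=
      ih.append_left l2.toList
    refine h1.trans ?_
    have h2 : ((l2.toList ++ (MTHeap.node v1 k1 l1 r1).toList) ++ r2.toList).Perm
        (((MTHeap.node v1 k1 l1 r1).toList ++ l2.toList) ++ r2.toList) :=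
      List.perm_append_comm.append_right r2.toList
    simpa [List.append_assoc] using h2

lemma mtHeap_root_min (v k : Int) (l r : MTHeap)
    (h : (MTHeap.node v k l r).IsHeap) :
    ∀ y ∈ (MTHeap.node v k l r).toList, v ≤ y := by
  intro y hy
  rcases List.mem_cons.1 hy with rfl | hy
  · exact le_refl _
  · exact h.1 y hy

lemma mtMake_isHeap (v : Int) (l r : MTHeap)
    (hmem : ∀ y ∈ l.toList ++ r.toList, v ≤ y) (hl : l.IsHeap) (hr : r.IsHeap) :
    (mtMake v l r).IsHeap := by
  unfold mtMake
  split
  · exact ⟨hmem, hl, hr⟩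
  · refine ⟨?_, hr, hl⟩
    intro y hy
    exact hmem y (by simpa [or_comm] using hy)

lemma mtMerge_isHeap (a b : MTHeap) (ha : a.IsHeap) (hb : b.IsHeap) :
    (mtMerge a b).IsHeap := by
  fun_induction mtMerge a b with
  | case1 b => exact hb
  | case2 a h => exact ha
  | case3 v1 k1 l1 r1 v2 k2 l2 r2 hle ih =>
    obtain ⟨hmem1, hl1, hr1⟩ := ha
    refine mtMake_isHeap _ _ _ ?_ hl1 (ih hr1 hb)
    intro y hy
    rcases List.mem_append.1 hy with hy | hy
    · exact hmem1 y (List.mem_append.2 (Or.inl hy))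
    · rcases List.mem_append.1 ((mtMerge_perm _ _).mem_iff.1 hy) with hy | hy
      · exact hmem1 y (List.mem_append.2 (Or.inr hy))
      · exact le_trans hle (mtHeap_root_min v2 k2 l2 r2 hb y hy)
  | case4 v1 k1 l1 r1 v2 k2 l2 r2 hle ih =>
    obtain ⟨hmem2, hl2, hr2⟩ := hb
    refine mtMake_isHeap _ _ _ ?_ hl2 (ih ha hr2)
    intro y hy
    rcases List.mem_append.1 hy with hy | hy
    · exact hmem2 y (List.mem_append.2 (Or.inl hy))
    · rcases List.mem_append.1 ((mtMerge_perm _ _).mem_iff.1 hy) with hy | hy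
      · exact le_trans (by omega) (mtHeap_root_min v1 k1 l1 r1 ha y hy)
      · exact hmem2 y (List.mem_append.2 (Or.inr hy))

-- the invariant relating A's state to B's state
def magicTowerInv (a : Int × Int × List Int) (moves hp : Int) (h : MTHeap) : Prop :=
  a.1 = moves ∧ a.2.1 = hp ∧ a.2.2.Perm h.toList ∧ h.IsHeap ∧ 0 < a.2.1

lemma magicTowerMain (nums : List Int) (a : Int × Int × List Int)
    (moves hp : Int) (h : MTHeap) (hinv : magicTowerInv a moves hp h) :
    (nums.foldl magicTowerStepA a).1 = magicTowerGo moves hp h nums := by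
  induction nums generalizing a moves hp h with
  | nil => exact hinv.1
  | cons x xs ih =>
    obtain ⟨r, c, tA⟩ := a
    obtain ⟨hr, hc, hperm, hheap, hpos⟩ := hinv
    simp only at hr hc hperm hheap hpos
    subst hr hc
    simp only [List.foldl_cons, magicTowerGo]
    set h' := if x < 0 then mtMerge (.node x 1 .leaf .leaf) h else h with hh'
    set t' : List Int := if x < 0 then tA ++ [x] else tA with ht'
    have hperm' : t'.Perm h'.toList := by
      rw [hh', ht']
      split
      · refine ((List.perm_append_singleton x tA).trans (hperm.cons x)).trans ?_
        exact ((mtMerge_perm _ h).trans (by simp [MTHeap.toList])).symm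
      · exact hperm
    have hheap' : h'.IsHeap := by
      rw [hh']
      split
      · exact mtMerge_isHeap _ _ (by simp [MTHeap.IsHeap, MTHeap.toList]) hheap
      · exact hheap
    have hstepA : magicTowerStepA (r, c, tA) x =
        (if c + x ≤ 0 then
          match PySem.List.min? t' (fun y => y) with
          | some m => (r + 1, c + x - m, (PySem.List.remove? t' m).getD t')
          | none => (r, c + x, t')
        else (r, c + x, t')) := rfl
    by_cases hcx : c + x ≤ 0
    · -- a move happens; x must be negative, so t' and h' are nonempty
      have hx : x < 0 := by by_contra hx; omega
      have ht'x : x ∈ t' := by rw [ht']; simp [hx]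
      obtain ⟨m, hm⟩ : ∃ m, PySem.List.min? t' (fun y => y) = some m := by
        cases hmin : PySem.List.min? t' (fun y => y) with
        | none =>
          have := (PySem.List.min?_eq_none_iff _ _).1 hmin
          rw [this] at ht'x; cases ht'x
        | some m => exact ⟨m, rfl⟩
      have hmmem : m ∈ t' := PySem.List.min?_mem hm
      have hmmin : ∀ y ∈ t', m ≤ y := fun y hy => PySem.List.min?_isMin hm y hy
      obtain ⟨v, k, l, rr, hnode⟩ : ∃ v k l rr, h' = MTHeap.node v k l rr := by
        cases hn : h' with
        | leaf =>
          rw [hn] at hperm'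
          have := hperm'.mem_iff.1 ht'x
          simp [MTHeap.toList] at this
        | node v k l rr => exact ⟨v, k, l, rr, rfl⟩
      have hpermN : t'.Perm (v :: (l.toList ++ rr.toList)) := by
        rw [hnode] at hperm'; exact hperm'
      have hheapN : (MTHeap.node v k l rr).IsHeap := hnode ▸ hheap'
      have hmv : m = v := by
        have h1 : v ≤ m :=
          mtHeap_root_min v k l rr hheapN m (hpermN.mem_iff.1 hmmem)
        have h2 : m ≤ v := hmmin v (hpermN.mem_iff.2 (List.mem_cons_self))
        omega
      have hrem : PySem.List.remove? t' m = some (t'.erase m) :=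
        PySem.List.remove?_eq_some_erase t' m hmmem
      subst hmv
      have hpermE : (t'.erase m).Perm (mtMerge l rr).toList := by
        have h1 : (t'.erase m).Perm ((m :: (l.toList ++ rr.toList)).erase m) :=
          hpermN.erase m
        rw [List.erase_cons_head] at h1
        exact h1.trans (mtMerge_perm l rr).symm
      have hmx : m ≤ x := hmmin x ht'x
      rw [hstepA, if_pos hcx, hm, hnode]
      simp only [hrem, Option.getD_some, if_pos hcx]
      refine ih _ (r + 1) (c + x - m) (mtMerge l rr)
        ⟨rfl, rfl, hpermE, mtMerge_isHeap l rr hheapN.2.1 hheapN.2.2, ?_⟩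
      change (0 : Int) < c + x - m
      omega
    · -- no move; both sides carry (·, c + x, ·)
      rw [hstepA, if_neg hcx]
      have hinv' : magicTowerInv (r, c + x, t') r (c + x) h' :=
        ⟨rfl, rfl, hperm', hheap', by change (0 : Int) < c + x; omega⟩
      cases hn : h' with
      | leaf =>
        rw [hn] at hinv'
        simpa using ih (r, c + x, t') r (c + x) .leaf hinv'
      | node v k l rr =>
        rw [hn] at hinv'
        simpa [if_neg hcx] using ih (r, c + x, t') r (c + x) (.node v k l rr) hinv'

-- ===== VERDICT (by name: the statement is the Claim_ definition above) =====
theorem magicTower_spec : Claim_equal_magicTower := by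
  intro nums _
  unfold Spec_magicTower magicTower magicTower_alt
  split
  · rfl
  · exact magicTowerMain nums (0, 1, []) 0 1 .leaf
      ⟨rfl, rfl, List.Perm.refl _, trivial, by norm_num⟩
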